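-- pv_equiv track=rewrite | github.com/msellamiTN/fedfca-framework | api/fastActor.py | condense_list
-- ===== SOURCE A (Python) =====
-- def condense_list(inputlist):
--     clist = []
--     to_skip = []
--
--     for x in range(0, len(inputlist)):
--         if x in to_skip:
--             continue
--         matched = 0
--         for y in range(x+1, len(inputlist)):
--             if y in to_skip:
--                 continue
--             if set(inputlist[x][0]) == set(inputlist[y][0]):
--                 tmp_tuple = inputlist[x][0], list(set(inputlist[x][1]).union(set(inputlist[y][1])))
--                 clist.append(tmp_tuple)
--                 to_skip.append(y)
--                 matched = 1
--                 break
--             elif set(inputlist[x][1]) == set(inputlist[y][1]):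
--                 tmp_tuple = list(set(inputlist[x][0]).union(set(inputlist[y][0]))), inputlist[x][1]
--                 clist.append(tmp_tuple)
--                 to_skip.append(y)
--                 matched = 1
--                 break
--         if matched == 0:
--             clist.append(inputlist[x])
--
--     return clist
-- ===== SOURCE B (Python) =====
-- def condense_list(inputlist):
--     result = []
--     open_first = {}   # frozenset of first component -> index in result of an open (never-merged) entry
--     open_second = {}  # same for second components
--     for pair in inputlist:
--         a, b = pair[0], pair[1]
--         ka = frozenset(a)
--         kb = frozenset(b)
--         i = open_first.get(ka)
--         j = open_second.get(kb)
--         k = i if i is not None and (j is None or i <= j) else j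
--         if k is None:
--             open_first[ka] = len(result)
--             open_second[kb] = len(result)
--             result.append(pair)
--         else:
--             c, d = result[k][0], result[k][1]
--             if k == i:
--                 result[k] = (c, list(set(d).union(set(b))))
--             else:
--                 result[k] = (list(set(c).union(set(a))), d)
--             if open_first.get(frozenset(c)) == k:
--                 del open_first[frozenset(c)]
--             if open_second.get(frozenset(d)) == k:
--                 del open_second[frozenset(d)]
--     return result
-- ===== Notes on version B (the rewrite author's own statement) =====
-- stated objective: faster
-- what changed: Replaced A's nested rescan over all later indices (plus a growing to_skip list scanned on every step) by a single left-to-right pass that keeps two dicts mapping frozenset keys of the components to the open result slot, so each element finds its merge partner by O(1) dict lookups and the result is patched in place.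
import Mathlib
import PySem

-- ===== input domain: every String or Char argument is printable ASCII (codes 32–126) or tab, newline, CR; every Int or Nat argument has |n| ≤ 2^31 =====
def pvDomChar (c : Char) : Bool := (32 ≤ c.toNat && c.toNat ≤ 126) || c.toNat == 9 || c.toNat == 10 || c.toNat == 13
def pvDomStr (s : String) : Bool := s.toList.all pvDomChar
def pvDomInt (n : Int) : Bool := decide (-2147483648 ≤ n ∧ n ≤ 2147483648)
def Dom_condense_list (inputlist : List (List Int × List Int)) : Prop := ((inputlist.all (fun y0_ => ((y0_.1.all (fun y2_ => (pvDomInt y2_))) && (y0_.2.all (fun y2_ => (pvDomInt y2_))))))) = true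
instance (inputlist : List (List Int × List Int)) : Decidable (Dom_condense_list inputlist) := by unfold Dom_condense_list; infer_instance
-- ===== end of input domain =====

-- B replaces A's quadratic rescan over later indices by one left-to-right pass with two
-- dicts from frozenset keys to the open result slot; return values are identical.

-- ===== shared model of CPython's set, used by BOTH ports for list(set(u).union(set(v))) =====
-- PySem.Set does not model iteration order, so this is a hand port of CPython's setobject.c
-- (open addressing, LINEAR_PROBES = 9, PERTURB_SHIFT = 5, growth x4 when fill*5 >= mask*3,
-- set_merge's big-resize/clone/insert_clean cases). Exact for int elements on the stated
-- domain |n| <= 2^31, where hash(n) = n except hash(-1) = -2. The fuel parameters only make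
-- the probe loops total; they are never exhausted on a real table (an LCG probe sequence
-- visits every slot).

def pvHashU (n : Int) : UInt64 :=
  UInt64.ofNat ((if n = -1 then -2 else n) % (2 ^ 64 : Int)).toNat

-- the do-while slot scan of set_add_entry: some (some j) = free slot j, some none = key present, none = keep probing
def pvScanAdd (table : Array (Option Int)) (key : Int) : Nat → Nat → Option (Option Nat)
  | _, 0 => none
  | i, c + 1 =>
    match table[i]? with
    | some none => some (some i)
    | some (some k) => if k = key then some none else pvScanAdd table key (i + 1) c
    | none => some none

def pvFindAdd (table : Array (Option Int)) (mask : UInt64) (key : Int) : UInt64 → UInt64 → Nat → Option Nat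
  | _, _, 0 => none
  | i, perturb, fuel + 1 =>
    let probes : Nat := if i + 9 ≤ mask then 9 else 0
    match pvScanAdd table key i.toNat (probes + 1) with
    | some r => r
    | none =>
      let perturb' := perturb >>> 5
      pvFindAdd table mask key ((i * 5 + 1 + perturb') &&& mask) perturb' fuel

def pvFirstEmpty (table : Array (Option Int)) : Nat → Nat → Option Nat
  | _, 0 => none
  | i, c + 1 =>
    match table[i]? with
    | some none => some i
    | _ => pvFirstEmpty table (i + 1) c

-- set_insert_clean's probe loop (first slot, then up to 9 linear probes, then perturb)
def pvFindClean (table : Array (Option Int)) (mask : UInt64) : UInt64 → UInt64 → Nat → Option Nat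
  | _, _, 0 => none
  | i, perturb, fuel + 1 =>
    match pvFirstEmpty table i.toNat (if i + 9 ≤ mask then 10 else 1) with
    | some j => some j
    | none =>
      let perturb' := perturb >>> 5
      pvFindClean table mask ((i * 5 + 1 + perturb') &&& mask) perturb' fuel

def pvInsertClean (table : Array (Option Int)) (key : Int) : Array (Option Int) :=
  let mask := UInt64.ofNat (table.size - 1)
  let h := pvHashU key
  match pvFindClean table mask (h &&& mask) h (table.size * 2 + 64) with
  | some j => table.set! j (some key)
  | none => table

-- newsize = 8; while newsize <= minused: newsize <<= 1
def pvNewSizeAux (minused : Nat) : Nat → Nat → Nat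
  | cur, 0 => cur
  | cur, f + 1 => if cur ≤ minused then pvNewSizeAux minused (cur * 2) f else cur

-- set_table_resize: re-insert the entries in table-scan order into a fresh table
def pvResize (s : Array (Option Int) × Nat) (minused : Nat) : Array (Option Int) × Nat :=
  (s.1.foldl (fun t e =>
      match e with
      | none => t
      | some k => pvInsertClean t k) (Array.replicate (pvNewSizeAux minused 8 64) none), s.2)

def pvSetAddC (s : Array (Option Int) × Nat) (key : Int) : Array (Option Int) × Nat :=
  let mask := UInt64.ofNat (s.1.size - 1)
  let h := pvHashU key
  match pvFindAdd s.1 mask key (h &&& mask) h (s.1.size * 2 + 64) with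
  | none => s
  | some j =>
    let t := s.1.set! j (some key)
    let used := s.2 + 1
    if 5 * used < 3 * (t.size - 1) then (t, used)
    else pvResize (t, used) (if used > 50000 then used * 2 else used * 4)

-- set(xs): the (table, used) state after adding each element
def pvSetOfC (xs : List Int) : Array (Option Int) × Nat :=
  xs.foldl pvSetAddC (Array.replicate 8 none, 0)

-- set_merge(s, other)
def pvSetMergeC (s other : Array (Option Int) × Nat) : Array (Option Int) × Nat :=
  let s := if 5 * (s.2 + other.2) ≥ 3 * (s.1.size - 1) then pvResize s ((s.2 + other.2) * 2) else s
  if s.2 = 0 ∧ s.1.size = other.1.size then other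
  else if s.2 = 0 then
    (other.1.foldl (fun t e =>
        match e with
        | none => t
        | some k => pvInsertClean t k) s.1, other.2)
  else
    other.1.foldl (fun acc e =>
        match e with
        | none => acc
        | some k => pvSetAddC acc k) s

-- iteration order: scan the table
def pvListOfC (s : Array (Option Int) × Nat) : List Int :=
  s.1.foldl (fun acc e =>
      match e with
      | some k => acc ++ [k]
      | none => acc) []

-- list(set(u).union(set(v))): copy of set(u) (an empty set merged with it), merged with set(v)
def pvUnionList (u v : List Int) : List Int :=
  pvListOfC (pvSetMergeC (pvSetMergeC (Array.replicate 8 none, 0) (pvSetOfC u)) (pvSetOfC v))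

-- set(u) == set(v) (extensional, order-free)
def pvSetEq (u v : List Int) : Bool :=
  PySem.Set.equal (PySem.Set.ofList u) (PySem.Set.ofList v)

-- ===== PORT A =====
-- A's inner 'for y in range(x+1, len(inputlist))' with its break: the merged tuple and y.
-- Indices fed to pyGetD come from pyRange over the list's length, hence always in range.
def pvInnerA (l : List (List Int × List Int)) (x : Int) (to_skip : List Int) :
    List Int → Option ((List Int × List Int) × Int)
  | [] => none
  | y :: ys =>
    if to_skip.contains y then pvInnerA l x to_skip ys
    else if pvSetEq (PySem.List.pyGetD l x ([], [])).1 (PySem.List.pyGetD l y ([], [])).1 then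
      some (((PySem.List.pyGetD l x ([], [])).1,
             pvUnionList (PySem.List.pyGetD l x ([], [])).2 (PySem.List.pyGetD l y ([], [])).2), y)
    else if pvSetEq (PySem.List.pyGetD l x ([], [])).2 (PySem.List.pyGetD l y ([], [])).2 then
      some ((pvUnionList (PySem.List.pyGetD l x ([], [])).1 (PySem.List.pyGetD l y ([], [])).1,
             (PySem.List.pyGetD l x ([], [])).2), y)
    else pvInnerA l x to_skip ys

def pvStepA (l : List (List Int × List Int))
    (st : List (List Int × List Int) × List Int) (x : Int) :
    List (List Int × List Int) × List Int :=
  if st.2.contains x then st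
  else
    match pvInnerA l x st.2 (PySem.List.pyRange (x + 1) (l.length : Int) 1) with
    | some (t, y) => (st.1 ++ [t], st.2 ++ [y])
    | none => (st.1 ++ [PySem.List.pyGetD l x ([], [])], st.2)

def condense_list (inputlist : List (List Int × List Int)) : List (List Int × List Int) :=
  ((PySem.List.pyRange 0 (inputlist.length : Int) 1).foldl (pvStepA inputlist) ([], [])).1

-- ===== PORT B =====
-- frozenset(u) as a dict key: the canonical sorted deduplicated list (frozensets are
-- compared extensionally, so any canonical representative is a faithful key)
def pvCanon (u : List Int) : List Int :=
  PySem.List.sorted (PySem.Set.ofList u) (fun x => x) false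

-- k = i if i is not None and (j is None or i <= j) else j
def pvPick (i j : Option Int) : Option Int :=
  match i, j with
  | some iv, some jv => if iv ≤ jv then some iv else some jv
  | some iv, none => some iv
  | none, _ => j

def pvStepB (st : List (List Int × List Int) × PySem.Dict (List Int) Int × PySem.Dict (List Int) Int)
    (ab : List Int × List Int) :
    List (List Int × List Int) × PySem.Dict (List Int) Int × PySem.Dict (List Int) Int :=
  match pvPick (st.2.1.get? (pvCanon ab.1)) (st.2.2.get? (pvCanon ab.2)) with
  | none =>
      (st.1 ++ [ab],
       st.2.1.insert (pvCanon ab.1) (st.1.length : Int),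
       st.2.2.insert (pvCanon ab.2) (st.1.length : Int))
  | some kv =>
      -- result[k] with k a stored valid index: pyGetD/pySetD exact here
      ((if some kv = st.2.1.get? (pvCanon ab.1) then
          PySem.List.pySetD st.1 kv
            ((PySem.List.pyGetD st.1 kv ([], [])).1,
             pvUnionList (PySem.List.pyGetD st.1 kv ([], [])).2 ab.2)
        else
          PySem.List.pySetD st.1 kv
            (pvUnionList (PySem.List.pyGetD st.1 kv ([], [])).1 ab.1,
             (PySem.List.pyGetD st.1 kv ([], [])).2)),
       (if st.2.1.get? (pvCanon (PySem.List.pyGetD st.1 kv ([], [])).1) = some kv then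
          st.2.1.erase (pvCanon (PySem.List.pyGetD st.1 kv ([], [])).1) else st.2.1),
       (if st.2.2.get? (pvCanon (PySem.List.pyGetD st.1 kv ([], [])).2) = some kv then
          st.2.2.erase (pvCanon (PySem.List.pyGetD st.1 kv ([], [])).2) else st.2.2))

def condense_list_alt (inputlist : List (List Int × List Int)) : List (List Int × List Int) :=
  (inputlist.foldl pvStepB ([], PySem.Dict.empty, PySem.Dict.empty)).1

-- ===== PRECONDITION & SPEC =====
def Spec_condense_list (inputlist : List (List Int × List Int)) (out : List (List Int × List Int)) : Prop := out = condense_list_alt inputlist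
instance (inputlist : List (List Int × List Int)) (out : List (List Int × List Int)) : Decidable (Spec_condense_list inputlist out) := by unfold Spec_condense_list; infer_instance

-- ===== CLAIM (what is proved, stated in full; the proofs are below) =====
def Claim_equal_condense_list : Prop := ∀ (inputlist : List (List Int × List Int)), Dom_condense_list inputlist → Spec_condense_list inputlist (condense_list inputlist)

-- ===== LEMMAS AND PROOFS =====

-- pair p matches pair q: the test A applies to (x, y) and B's two key lookups apply to (slot, incoming)
def pvMatch (p q : List Int × List Int) : Bool :=
  pvSetEq p.1 q.1 || pvSetEq p.2 q.2

def pvMerge (p q : List Int × List Int) : List Int × List Int :=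
  if pvSetEq p.1 q.1 then (p.1, pvUnionList p.2 q.2) else (pvUnionList p.1 q.1, p.2)

-- extract the first match of p from a list, returning it and the remainder
def pvExtract (p : List Int × List Int) :
    List (List Int × List Int) → Option ((List Int × List Int) × List (List Int × List Int))
  | [] => none
  | q :: l =>
    if pvMatch p q then some (q, l)
    else
      match pvExtract p l with
      | some (w, l') => some (w, q :: l')
      | none => none

lemma pvExtract_length (p : List Int × List Int) :
    ∀ l w l', pvExtract p l = some (w, l') → l'.length + 1 = l.length := by
  intro l
  induction l with
  | nil => intro w l' h; simp [pvExtract] at h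
  | cons q l ih =>
    intro w l' h
    simp only [pvExtract] at h
    split at h
    · cases h; simp
    · cases hx : pvExtract p l with
      | none => rw [hx] at h; simp at h
      | some r =>
        rw [hx] at h
        cases h
        have := ih r.1 r.2 (by rw [hx])
        simp; omega

-- both greedy formulations reduce to this recursive specification
def pvSpec : List (List Int × List Int) → List (List Int × List Int)
  | [] => []
  | p :: l =>
    match hx : pvExtract p l with
    | some (q, l') => pvMerge p q :: pvSpec l'
    | none => p :: pvSpec l
termination_by l => l.length
decreasing_by
  · have := pvExtract_length p l q l' hx; simp; omega
  · simp

-- ---- set-equality and canonical keys ----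

lemma pvSetEq_iff_canon (u v : List Int) : pvSetEq u v = true ↔ pvCanon u = pvCanon v := by
  constructor
  · intro h
    rw [pvSetEq, PySem.Set.equal_iff] at h
    apply PySem.List.sorted_eq_of_perm_of_pairwise_lt
    · exact ((PySem.List.sorted_perm _ _ _).trans
        ((List.perm_ext_iff_of_nodup (PySem.Set.nodup_ofList v) (PySem.Set.nodup_ofList u)).mpr
          (fun a => (h a).symm)))
    · exact PySem.List.sorted_ofList_pairwise_lt v
  · intro h
    rw [pvSetEq, PySem.Set.equal_iff]
    intro x
    have hu : x ∈ PySem.Set.ofList u ↔ x ∈ pvCanon u := (PySem.List.mem_sorted ..).symm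
    have hv : x ∈ PySem.Set.ofList v ↔ x ∈ pvCanon v := (PySem.List.mem_sorted ..).symm
    rw [hu, hv, h]

lemma pvSetEq_symm (u v : List Int) : pvSetEq u v = pvSetEq v u := by
  rw [Bool.eq_iff_iff, pvSetEq_iff_canon, pvSetEq_iff_canon]
  exact comm

lemma pvMatch_symm (p q : List Int × List Int) : pvMatch p q = pvMatch q p := by
  unfold pvMatch
  rw [pvSetEq_symm p.1, pvSetEq_symm p.2]

-- ---- pvExtract facts ----

lemma pvExtract_none_iff (p : List Int × List Int) :
    ∀ zs, pvExtract p zs = none ↔ ∀ q ∈ zs, pvMatch p q = false := by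
  intro zs
  induction zs with
  | nil => simp [pvExtract]
  | cons q zs ih =>
    constructor
    · intro h0
      simp only [pvExtract] at h0
      by_cases h : pvMatch p q
      · simp [h] at h0
      · cases hx : pvExtract p zs with
        | none =>
          intro b hb
          rcases List.mem_cons.mp hb with rfl | hb
          · simpa using h
          · exact (ih.mp hx) b hb
        | some r => rw [hx] at h0; simp [h] at h0
    · intro hall
      have h : pvMatch p q = false := hall q (by simp)
      have h2 : pvExtract p zs = none := ih.mpr (fun b hb => hall b (by simp [hb]))
      simp [pvExtract, h, h2]

lemma pvExtract_append_nomatch (p : List Int × List Int) (as : List (List Int × List Int))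
    (h : ∀ a ∈ as, pvMatch p a = false) (l : List (List Int × List Int)) :
    pvExtract p (as ++ l) = (pvExtract p l).map (fun r => (r.1, as ++ r.2)) := by
  induction as with
  | nil => simp [Option.map_id']
  | cons a as ih =>
    have ha := h a (by simp)
    simp only [List.cons_append, pvExtract, ha, Bool.false_eq_true, if_false]
    rw [ih (fun b hb => h b (by simp [hb]))]
    cases pvExtract p l with
    | none => rfl
    | some r => rfl

lemma pvExtract_of_prefix (p : List Int × List Int) (as : List (List Int × List Int))
    (h : ∀ a ∈ as, pvMatch p a = false) (q : List Int × List Int) (bs : List (List Int × List Int))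
    (hq : pvMatch p q = true) :
    pvExtract p (as ++ q :: bs) = some (q, as ++ bs) := by
  rw [pvExtract_append_nomatch p as h]
  simp [pvExtract, hq]

-- ---- pvSpec equation lemmas ----

lemma pvSpec_nil : pvSpec [] = [] := by rw [pvSpec.eq_def]

lemma pvSpec_cons_none (p : List Int × List Int) (l : List (List Int × List Int))
    (h : pvExtract p l = none) : pvSpec (p :: l) = p :: pvSpec l := by
  rw [pvSpec.eq_def]
  split
  case h_1 => simp_all
  case h_2 q' l' heq =>
    obtain ⟨rfl, rfl⟩ := heq
    split <;> simp_all

lemma pvSpec_cons_some (p q : List Int × List Int) (l l' : List (List Int × List Int))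
    (h : pvExtract p l = some (q, l')) : pvSpec (p :: l) = pvMerge p q :: pvSpec l' := by
  rw [pvSpec.eq_def]
  split
  case h_1 => simp_all
  case h_2 q' l'' heq =>
    obtain ⟨rfl, rfl⟩ := heq
    split <;> simp_all

-- ---- pvSpec facts ----

-- on a pairwise non-matching list the specification is the identity
lemma pvSpec_pairwise (ps : List (List Int × List Int))
    (h : List.Pairwise (fun a b => pvMatch a b = false) ps) : pvSpec ps = ps := by
  induction ps with
  | nil => exact pvSpec_nil
  | cons q ps ih =>
    rw [pvSpec_cons_none q ps ((pvExtract_none_iff q ps).mpr (List.pairwise_cons.mp h).1)]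
    rw [ih (List.pairwise_cons.mp h).2]

lemma pvSpec_length_ge (n : Nat) :
    ∀ ps l, ps.length + l.length ≤ n →
      List.Pairwise (fun a b => pvMatch a b = false) ps →
      ps.length ≤ (pvSpec (ps ++ l)).length := by
  induction n with
  | zero =>
    intro ps l h _
    have h0 : ps.length = 0 := by omega
    simp [h0]
  | succ n ih =>
    intro ps l hn hp
    cases ps with
    | nil => simp
    | cons q ps =>
      obtain ⟨hq, hps⟩ := List.pairwise_cons.mp hp
      rw [List.cons_append]
      have hx' := pvExtract_append_nomatch q ps hq l
      cases hx : pvExtract q l with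
      | none =>
        rw [hx] at hx'
        rw [pvSpec_cons_none _ _ hx']
        have := ih ps l (by simp at hn ⊢; omega) hps
        simp at this ⊢; omega
      | some r =>
        rw [hx] at hx'
        rw [pvSpec_cons_some _ _ _ _ (by rw [hx']; rfl)]
        have hlen := pvExtract_length q l r.1 r.2 (by rw [hx])
        have := ih ps r.2 (by simp at hn ⊢; omega) hps
        simp at this ⊢; omega

lemma pvSpec_length_gt (n : Nat) :
    ∀ ps p l, ps.length + l.length ≤ n →
      List.Pairwise (fun a b => pvMatch a b = false) ps →
      (∀ a ∈ ps, pvMatch a p = false) →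
      ps.length + 1 ≤ (pvSpec (ps ++ p :: l)).length := by
  induction n with
  | zero =>
    intro ps p l h hp hnm
    have h0 : ps.length = 0 := by omega
    rw [List.length_eq_zero_iff.mp h0, List.nil_append]
    cases hx : pvExtract p l with
    | none => rw [pvSpec_cons_none _ _ hx]; simp
    | some r => rw [pvSpec_cons_some _ _ _ _ (by rw [hx])]; simp
  | succ n ih =>
    intro ps p l hn hp hnm
    cases ps with
    | nil =>
      rw [List.nil_append]
      cases hx : pvExtract p l with
      | none => rw [pvSpec_cons_none _ _ hx]; simp
      | some r => rw [pvSpec_cons_some _ _ _ _ (by rw [hx])]; simp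
    | cons q ps =>
      obtain ⟨hq, hps⟩ := List.pairwise_cons.mp hp
      have hqp : pvMatch q p = false := hnm q (by simp)
      rw [List.cons_append]
      have hq' : ∀ a ∈ ps ++ [p], pvMatch q a = false := by
        intro a ha
        rcases List.mem_append.mp ha with ha | ha
        · exact hq a ha
        · simp only [List.mem_singleton] at ha
          subst ha
          exact hqp
      have hx' := pvExtract_append_nomatch q (ps ++ [p]) hq' l
      simp only [List.append_assoc, List.cons_append, List.nil_append] at hx'
      cases hx : pvExtract q l with
      | none =>
        rw [hx] at hx'
        rw [pvSpec_cons_none _ _ hx']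
        have := ih ps p l (by simp at hn ⊢; omega) hps (fun a ha => hnm a (by simp [ha]))
        simp at this ⊢; omega
      | some r =>
        rw [hx] at hx'
        rw [pvSpec_cons_some _ _ _ _ (by rw [hx']; rfl)]
        have hlen := pvExtract_length q l r.1 r.2 (by rw [hx])
        have := ih ps p r.2 (by simp at hn ⊢; omega) hps (fun a ha => hnm a (by simp [ha]))
        simp at this ⊢; omega

-- exchange: the first matching earlier element q absorbs p; everything else is untouched
lemma pvSpec_exchange :
    ∀ (as : List (List Int × List Int)) (q p : List Int × List Int)
      (bs l : List (List Int × List Int)),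
      List.Pairwise (fun a b => pvMatch a b = false) (as ++ q :: bs) →
      pvMatch q p = true →
      (∀ a ∈ as, pvMatch a p = false) →
      pvSpec (as ++ q :: bs ++ p :: l) =
        (pvSpec (as ++ bs ++ l)).insertIdx as.length (pvMerge q p) := by
  intro as
  induction as with
  | nil =>
    intro q p bs l hp hm _
    obtain ⟨hq, _⟩ := List.pairwise_cons.mp hp
    simp only [List.nil_append, List.cons_append]
    rw [pvSpec_cons_some q p _ _ (pvExtract_of_prefix q bs (fun b hb => hq b (by simp [hb])) p l hm)]
    simp
  | cons a as ih =>
    intro q p bs l hp hm hnm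
    obtain ⟨ha, hps⟩ := List.pairwise_cons.mp hp
    have hnm' : ∀ b ∈ as ++ q :: bs ++ [p], pvMatch a b = false := by
      intro b hb
      rcases List.mem_append.mp hb with hb1 | hb1
      · exact ha b hb1
      · rw [show b = p by simpa using hb1]
        exact hnm a (by simp)
    have hnm'' : ∀ b ∈ as ++ bs, pvMatch a b = false := by
      intro b hb
      rcases List.mem_append.mp hb with hb | hb
      · exact ha b (by simp [hb])
      · exact ha b (by simp [hb])
    have hx1 := pvExtract_append_nomatch a (as ++ q :: bs ++ [p]) hnm' l
    have hx2 := pvExtract_append_nomatch a (as ++ bs) hnm'' l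
    simp only [List.append_assoc, List.cons_append, List.nil_append] at hx1 hx2 ⊢
    cases hx : pvExtract a l with
    | none =>
      rw [hx] at hx1 hx2
      rw [pvSpec_cons_none _ _ hx1, pvSpec_cons_none _ _ hx2]
      have := ih q p bs l hps hm (fun b hb => hnm b (by simp [hb]))
      simp only [List.append_assoc, List.cons_append] at this
      rw [this]
      simp [List.insertIdx_succ_cons]
    | some r =>
      rw [hx] at hx1 hx2
      rw [pvSpec_cons_some _ _ _ _ (by rw [hx1]; rfl), pvSpec_cons_some _ _ _ _ (by rw [hx2]; rfl)]
      have := ih q p bs r.2 hps hm (fun b hb => hnm b (by simp [hb]))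
      simp only [List.append_assoc, List.cons_append] at this
      rw [this]
      simp [List.insertIdx_succ_cons]

-- ---- port A equals the specification ----

def pvG (l : List (List Int × List Int)) (y : Int) : List Int × List Int :=
  PySem.List.pyGetD l y ([], [])

-- skipping during the inner scan = filtering the candidate list first
lemma pvInnerA_skip_eq_filter (l : List (List Int × List Int)) (x : Int) (skip : List Int) :
    ∀ ys, pvInnerA l x skip ys = pvInnerA l x [] (ys.filter (fun y => !skip.contains y)) := by
  intro ys
  induction ys with
  | nil => rfl
  | cons y ys ih =>
    by_cases h : skip.contains y
    · have hstep : pvInnerA l x skip (y :: ys) = pvInnerA l x skip ys := by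
        rw [pvInnerA]
        split
        · rfl
        · simp_all
      rw [hstep, List.filter_cons_of_neg (by simpa using h)]
      exact ih
    · rw [List.filter_cons_of_pos (by simpa using h)]
      simp only [pvInnerA, h, List.contains_nil, Bool.false_eq_true, if_false]
      split
      · rfl
      · split
        · rfl
        · exact ih

lemma pvInnerA_nil_none (l : List (List Int × List Int)) (x : Int) :
    ∀ ys, pvInnerA l x [] ys = none ↔ ∀ y ∈ ys, pvMatch (pvG l x) (pvG l y) = false := by
  intro ys
  induction ys with
  | nil => simp [pvInnerA]
  | cons y ys ih =>
    simp only [pvInnerA, List.contains_nil, Bool.false_eq_true, if_false]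
    by_cases h1 : pvSetEq (PySem.List.pyGetD l x ([], [])).1 (PySem.List.pyGetD l y ([], [])).1
    · simp [h1, pvMatch, pvG]
    · by_cases h2 : pvSetEq (PySem.List.pyGetD l x ([], [])).2 (PySem.List.pyGetD l y ([], [])).2
      · simp [h1, h2, pvMatch, pvG]
      · simp only [Bool.not_eq_true] at h1 h2
        simp [h1, h2, ih, pvMatch, pvG]

lemma pvInnerA_nil_some (l : List (List Int × List Int)) (x : Int) :
    ∀ ys t y, pvInnerA l x [] ys = some (t, y) →
      ∃ as bs, ys = as ++ y :: bs ∧ (∀ a ∈ as, pvMatch (pvG l x) (pvG l a) = false) ∧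
        pvMatch (pvG l x) (pvG l y) = true ∧ t = pvMerge (pvG l x) (pvG l y) := by
  intro ys
  induction ys with
  | nil => intro t y h; simp [pvInnerA] at h
  | cons z ys ih =>
    intro t y h
    simp only [pvInnerA, List.contains_nil, Bool.false_eq_true, if_false] at h
    by_cases h1 : pvSetEq (PySem.List.pyGetD l x ([], [])).1 (PySem.List.pyGetD l z ([], [])).1
    · simp only [h1, if_true] at h
      obtain ⟨ht, hy⟩ := Prod.mk.injEq .. ▸ (Option.some.injEq .. ▸ h)
      refine ⟨[], ys, by simp [hy], by simp, ?_, ?_⟩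
      · rw [← hy]; simp [pvMatch, pvG, h1]
      · rw [← hy, ← ht]; simp [pvMerge, pvG, h1]
    · simp only [Bool.not_eq_true] at h1
      simp only [h1, Bool.false_eq_true, if_false] at h
      by_cases h2 : pvSetEq (PySem.List.pyGetD l x ([], [])).2 (PySem.List.pyGetD l z ([], [])).2
      · simp only [h2, if_true] at h
        obtain ⟨ht, hy⟩ := Prod.mk.injEq .. ▸ (Option.some.injEq .. ▸ h)
        refine ⟨[], ys, by simp [hy], by simp, ?_, ?_⟩
        · rw [← hy]; simp [pvMatch, pvG, h1, h2]
        · rw [← hy, ← ht]; simp [pvMerge, pvG, h1, h2]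
      · simp only [Bool.not_eq_true] at h2
        simp only [h2, Bool.false_eq_true, if_false] at h
        obtain ⟨as, bs, hys, hnm, hm, ht⟩ := ih t y h
        refine ⟨z :: as, bs, by rw [hys]; rfl, ?_, hm, ht⟩
        intro a ha
        rcases List.mem_cons.mp ha with rfl | ha
        · simp [pvMatch, pvG, h1, h2]
        · exact hnm a ha

-- the candidate pairs at step k: indices ≥ k not yet skipped, fetched from the list
def pvRem (l : List (List Int × List Int)) (k : Int) (skip : List Int) :
    List (List Int × List Int) :=
  ((PySem.List.pyRange k (l.length : Int) 1).filter (fun y => !skip.contains y)).map (pvG l)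

lemma pvA_loop (l : List (List Int × List Int)) :
    ∀ (m k : Nat) (acc : List (List Int × List Int)) (skip : List Int),
      k ≤ l.length → l.length - k = m →
      ((PySem.List.pyRange (k : Int) (l.length : Int) 1).foldl (pvStepA l) (acc, skip)).1 =
        acc ++ pvSpec (pvRem l (k : Int) skip) := by
  intro m
  induction m with
  | zero =>
    intro k acc skip hk hm
    have hkl : k = l.length := by omega
    subst hkl
    rw [PySem.List.pyRange_one_eq_nil (by omega)]
    unfold pvRem
    rw [PySem.List.pyRange_one_eq_nil (by omega)]
    simp [pvSpec_nil]
  | succ m ih =>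
    intro k acc skip hk hm
    have hkl : k < l.length := by omega
    rw [PySem.List.pyRange_one_cons (by exact_mod_cast hkl)]
    by_cases hsk : skip.contains (k : Int)
    · have hstep : pvStepA l (acc, skip) (k : Int) = (acc, skip) := by
        unfold pvStepA
        rw [if_pos hsk]
      have hihr := ih (k + 1) acc skip (by omega) (by omega)
      push_cast at hihr
      have hremeq : pvRem l ((k : Int) + 1) skip = pvRem l (k : Int) skip := by
        unfold pvRem
        rw [show PySem.List.pyRange (k : Int) (l.length : Int) 1 =
            (k : Int) :: PySem.List.pyRange ((k : Int) + 1) (l.length : Int) 1 from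
          PySem.List.pyRange_one_cons (by exact_mod_cast hkl)]
        rw [List.filter_cons_of_neg (by simpa using hsk)]
      rw [List.foldl_cons, hstep, hihr, hremeq]
    · have hfilter := pvInnerA_skip_eq_filter l (k : Int) skip
        (PySem.List.pyRange ((k : Int) + 1) (l.length : Int) 1)
      set ys := (PySem.List.pyRange ((k : Int) + 1) (l.length : Int) 1).filter
        (fun y => !skip.contains y) with hys
      have hrem0 : pvRem l (k : Int) skip = pvG l (k : Int) :: ys.map (pvG l) := by
        unfold pvRem
        rw [show PySem.List.pyRange (k : Int) (l.length : Int) 1 =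
            (k : Int) :: PySem.List.pyRange ((k : Int) + 1) (l.length : Int) 1 from
          PySem.List.pyRange_one_cons (by exact_mod_cast hkl)]
        rw [List.filter_cons_of_pos (by simpa using hsk)]
        rw [List.map_cons]
      have hnd : ys.Nodup := (PySem.List.nodup_pyRange_one _ _).filter _
      cases hinner : pvInnerA l (k : Int) skip
          (PySem.List.pyRange ((k : Int) + 1) (l.length : Int) 1) with
      | none =>
        have hstep : pvStepA l (acc, skip) (k : Int) = (acc ++ [pvG l (k : Int)], skip) := by
          unfold pvStepA
          rw [if_neg hsk, hinner]
          rfl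
        rw [List.foldl_cons, hstep]
        have hihr := ih (k + 1) (acc ++ [pvG l (k : Int)]) skip (by omega) (by omega)
        push_cast at hihr
        rw [hihr, hrem0]
        have hnone : pvExtract (pvG l (k : Int)) (ys.map (pvG l)) = none := by
          rw [pvExtract_none_iff]
          intro q hq
          obtain ⟨y, hy, rfl⟩ := List.mem_map.mp hq
          exact ((pvInnerA_nil_none l _ ys).mp (hfilter ▸ hinner)) y hy
        rw [pvSpec_cons_none _ _ hnone]
        simp [pvRem, hys]
      | some ty =>
        obtain ⟨t, y⟩ := ty
        obtain ⟨as, bs, hsplit, hnm, hm, ht⟩ :=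
          pvInnerA_nil_some l (k : Int) ys t y (hfilter ▸ hinner)
        have hstep : pvStepA l (acc, skip) (k : Int) = (acc ++ [t], skip ++ [y]) := by
          unfold pvStepA
          rw [if_neg hsk, hinner]
        rw [List.foldl_cons, hstep]
        have hihr := ih (k + 1) (acc ++ [t]) (skip ++ [y]) (by omega) (by omega)
        push_cast at hihr
        rw [hihr, hrem0]
        -- the appended skip entry removes exactly y from the candidates
        have hnd' : (as ++ y :: bs).Nodup := hsplit ▸ hnd
        have hyas : ∀ a ∈ as, (!(a == y)) = true := by
          intro a haa
          have hdisj := (List.nodup_append.mp hnd').2.2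
          simpa using fun hay => hdisj a haa y (by simp) hay
        have hybs : y ∉ bs := (List.nodup_cons.mp (List.nodup_append.mp hnd').2.1).1
        have hrem2 : pvRem l ((k : Int) + 1) (skip ++ [y]) = (as ++ bs).map (pvG l) := by
          unfold pvRem
          have hpt : ∀ z, (!(skip ++ [y]).contains z) = ((!(z == y)) && !skip.contains z) := by
            intro z
            by_cases hz : z = y <;> by_cases hzs : z ∈ skip <;>
              simp [hz, hzs, List.contains_append]
          rw [funext hpt, ← List.filter_filter, ← hys, hsplit]
          rw [List.filter_append, List.filter_cons_of_neg (by simp)]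
          rw [List.filter_eq_self.mpr hyas,
              List.filter_eq_self.mpr (by
                intro b hb
                have hbne : b ≠ y := fun h => hybs (h ▸ hb)
                simpa using hbne)]
        rw [hrem2]
        rw [pvSpec_cons_some _ _ _ _ (by
          rw [hsplit, List.map_append, List.map_cons]
          exact pvExtract_of_prefix _ _ (by
            intro a ha
            obtain ⟨z, hz, rfl⟩ := List.mem_map.mp ha
            exact hnm z hz) _ _ hm)]
        rw [ht, List.map_append]
        simp

theorem condense_list_A_eq_spec (l : List (List Int × List Int)) : condense_list l = pvSpec l := by
  unfold condense_list
  rw [show ((0 : Int) = ((0 : Nat) : Int)) from by simp,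
    pvA_loop l l.length 0 [] [] (by omega) (by omega)]
  unfold pvRem
  rw [List.filter_eq_self.mpr (by intro a _; simp)]
  unfold pvG
  push_cast
  rw [PySem.List.map_pyGetD_pyRange_zero']
  simp

-- ---- port B equals the specification ----

-- overwrite the open slots with the corresponding outputs, append the rest
def pvPatch : List (List Int × List Int) → List (Nat × (List Int × List Int)) →
    List (List Int × List Int) → List (List Int × List Int)
  | res, [], out => res ++ out
  | res, _ :: _, [] => res
  | res, (i, _) :: opens, o :: out => pvPatch (res.set i o) opens out

lemma pvGetD_set_ne (res : List (List Int × List Int)) (n m : Nat)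
    (v d : List Int × List Int) (h : m ≠ n) : (res.set n v).getD m d = res.getD m d := by
  rw [List.getD_eq_getElem?_getD, List.getD_eq_getElem?_getD, List.getElem?_set_ne (fun hc => h hc.symm)]

lemma pvPatch_self : ∀ (opens : List (Nat × (List Int × List Int))) res,
    (∀ e ∈ opens, e.1 < res.length ∧ res.getD e.1 ([], []) = e.2) →
    pvPatch res opens (opens.map (·.2)) = res := by
  intro opens
  induction opens with
  | nil => intro res _; simp [pvPatch]
  | cons e opens ih =>
    intro res h
    obtain ⟨i, w⟩ := e
    obtain ⟨he1, he2⟩ := h (i, w) (by simp)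
    simp only at he1 he2
    simp only [List.map_cons, pvPatch]
    have hset : res.set i w = res := by
      conv_lhs => rw [← he2]
      rw [List.getD_eq_getElem _ _ he1]
      exact List.set_getElem_self he1
    rw [hset]
    exact ih res (fun a ha => h a (by simp [ha]))

lemma pvPatch_snoc : ∀ (opens : List (Nat × (List Int × List Int))) res p w out,
    (∀ e ∈ opens, e.1 < res.length) → opens.length + 1 ≤ out.length →
    pvPatch (res ++ [p]) (opens ++ [(res.length, w)]) out = pvPatch res opens out := by
  intro opens
  induction opens with
  | nil =>
    intro res p w out _ hlen
    cases out with
    | nil => simp at hlen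
    | cons o out =>
      simp only [List.nil_append, pvPatch]
      have hset : (res ++ [p]).set res.length o = res ++ [o] := by
        simp [List.set_append]
      rw [hset]
      simp
  | cons e opens ih =>
    intro res p w out h hlen
    obtain ⟨i, pp⟩ := e
    cases out with
    | nil => simp at hlen
    | cons o out =>
      have hi : i < res.length := h (i, pp) (by simp)
      simp only [List.cons_append, pvPatch]
      have hset : (res ++ [p]).set i o = (res.set i o) ++ [p] := by
        simp [List.set_append, hi]
      rw [hset]
      have hrec := ih (res.set i o) p w out (by
        intro a ha
        rw [List.length_set]
        exact h a (by simp [ha])) (by simp at hlen ⊢; omega)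
      rw [List.length_set] at hrec
      exact hrec

lemma pvPatch_insert : ∀ (as : List (Nat × (List Int × List Int))) res out
    (ipos : Nat) (q : List Int × List Int) bs (o : List Int × List Int),
    (∀ e ∈ as, e.1 < res.length) → ipos < res.length →
    (∀ e ∈ as, e.1 ≠ ipos) → as.length ≤ out.length →
    pvPatch res (as ++ (ipos, q) :: bs) (out.insertIdx as.length o) =
      pvPatch (res.set ipos o) (as ++ bs) out := by
  intro as
  induction as with
  | nil =>
    intro res out ipos q bs o _ _ _ _
    simp only [List.nil_append, List.length_nil, List.insertIdx_zero, pvPatch]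
  | cons e as ih =>
    intro res out ipos q bs o hlt hipos hne hlen
    obtain ⟨i, pp⟩ := e
    cases out with
    | nil => simp at hlen
    | cons o1 out =>
      simp only [List.length_cons, List.insertIdx_succ_cons, List.cons_append, pvPatch]
      have hne0 : i ≠ ipos := hne (i, pp) (by simp)
      rw [List.set_comm _ _ (fun hc => hne0 hc.symm)]
      have hrec := ih (res.set i o1) out ipos q bs o (by
        intro a ha
        rw [List.length_set]
        exact hlt a (by simp [ha])) (by rw [List.length_set]; exact hipos)
        (fun a ha => hne a (by simp [ha])) (by simp at hlen ⊢; omega)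
      exact hrec

lemma pvFind?_filter_ne {ν : Type} (items : List (List Int × ν)) (k k' : List Int) :
    (items.filter (fun p => !p.1 == k)).find? (fun p => p.1 == k') =
      (if k' = k then none else items.find? (fun p => p.1 == k')) := by
  induction items with
  | nil => split <;> rfl
  | cons p items ih =>
    by_cases h1 : p.1 = k
    · rw [List.filter_cons_of_neg (by simp [h1]), ih]
      by_cases h2 : k' = k
      · simp [h2]
      · rw [if_neg h2, if_neg h2, List.find?_cons_of_neg (by simp [h1]; exact fun hc => h2 hc.symm)]
    · rw [List.filter_cons_of_pos (by simp [h1])]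
      by_cases h3 : p.1 = k'
      · have h2 : ¬ (k' = k) := fun hc => h1 (h3.trans hc)
        rw [List.find?_cons_of_pos (by simp [h3]), if_neg h2,
          List.find?_cons_of_pos (by simp [h3])]
      · rw [List.find?_cons_of_neg (by simp [h3]), ih]
        by_cases h2 : k' = k
        · simp [h2]
        · rw [if_neg h2, if_neg h2, List.find?_cons_of_neg (by simp [h3])]

lemma pvDict_get?_erase (d : PySem.Dict (List Int) Int) (k k' : List Int) :
    (d.erase k).get? k' = (if k' = k then none else d.get? k') := by
  show ((d.items.filter (fun p => !p.1 == k)).find? (fun p => p.1 == k')).map (·.2) =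
    (if k' = k then none else (d.items.find? (fun p => p.1 == k')).map (·.2))
  rw [pvFind?_filter_ne]
  split <;> rfl

lemma pvFind?_append_middle {α : Type} (P : α → Bool) (as bs : List α) (e : α)
    (he : P e = false) : (as ++ e :: bs).find? P = (as ++ bs).find? P := by
  induction as with
  | nil => rw [List.nil_append, List.nil_append, List.find?_cons_of_neg (by simp [he])]
  | cons a as ih =>
    by_cases h : P a
    · rw [List.cons_append, List.cons_append, List.find?_cons_of_pos h, List.find?_cons_of_pos h]
    · rw [List.cons_append, List.cons_append, List.find?_cons_of_neg (by simp [h]),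
        List.find?_cons_of_neg (by simp [h]), ih]

-- one merge step of B: the chosen open slot absorbs p, its keys leave the dicts
lemma pvB_merge_case
    (p : List Int × List Int) (l res : List (List Int × List Int))
    (opens : List (Nat × (List Int × List Int))) (of os : PySem.Dict (List Int) Int)
    (estar : Nat × (List Int × List Int))
    (hpos : List.Pairwise (fun a b => a.1 < b.1) opens)
    (hval : ∀ e ∈ opens, e.1 < res.length ∧ res.getD e.1 ([], []) = e.2)
    (hnm : List.Pairwise (fun a b => pvMatch a.2 b.2 = false) opens)
    (hof : ∀ k, of.get? k = (opens.find? (fun e => pvCanon e.2.1 == k)).map (fun e => (e.1 : Int)))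
    (hos : ∀ k, os.get? k = (opens.find? (fun e => pvCanon e.2.2 == k)).map (fun e => (e.1 : Int)))
    (hestar : estar ∈ opens) (hmatchstar : pvMatch estar.2 p = true)
    (hpick : pvPick (of.get? (pvCanon p.1)) (os.get? (pvCanon p.2)) = some ((estar.1 : Int)))
    (hbranch : (some ((estar.1 : Int)) = of.get? (pvCanon p.1)) ↔ pvSetEq estar.2.1 p.1 = true)
    (hmin : ∀ a ∈ opens, pvMatch a.2 p = true → estar.1 ≤ a.1)
    (ihfun : ∀ (res : List (List Int × List Int)) (opens : List (Nat × (List Int × List Int)))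
      (of os : PySem.Dict (List Int) Int),
      List.Pairwise (fun a b => a.1 < b.1) opens →
      (∀ e ∈ opens, e.1 < res.length ∧ res.getD e.1 ([], []) = e.2) →
      List.Pairwise (fun a b => pvMatch a.2 b.2 = false) opens →
      (∀ k, of.get? k = (opens.find? (fun e => pvCanon e.2.1 == k)).map (fun e => (e.1 : Int))) →
      (∀ k, os.get? k = (opens.find? (fun e => pvCanon e.2.2 == k)).map (fun e => (e.1 : Int))) →
      (l.foldl pvStepB (res, of, os)).1 = pvPatch res opens (pvSpec (opens.map (·.2) ++ l))) :
    (l.foldl pvStepB (pvStepB (res, of, os) p)).1 =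
      pvPatch res opens (pvSpec (opens.map (·.2) ++ p :: l)) := by
  -- uniqueness of canonical keys among the open slots
  have hsym : Symmetric (fun a b : Nat × (List Int × List Int) => pvMatch a.2 b.2 = false) := by
    intro a b h
    rw [pvMatch_symm]
    exact h
  have huniq1 : ∀ e ∈ opens, ∀ e' ∈ opens, pvCanon e.2.1 = pvCanon e'.2.1 → e = e' := by
    intro e he e' he' hc
    by_contra hne
    have hm := hnm.forall hsym he he' hne
    have : pvMatch e.2 e'.2 = true := by
      unfold pvMatch
      rw [(pvSetEq_iff_canon ..).mpr hc]
      simp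
    simp [this] at hm
  have huniq2 : ∀ e ∈ opens, ∀ e' ∈ opens, pvCanon e.2.2 = pvCanon e'.2.2 → e = e' := by
    intro e he e' he' hc
    by_contra hne
    have hm := hnm.forall hsym he he' hne
    have : pvMatch e.2 e'.2 = true := by
      unfold pvMatch
      rw [(pvSetEq_iff_canon ..).mpr hc]
      simp
    simp [this] at hm
  have hvs := hval estar hestar
  have hget : PySem.List.pyGetD res ((estar.1 : Int)) ([], []) = estar.2 := by
    rw [PySem.List.pyGetD_natCast]
    exact hvs.2
  have hofstar : of.get? (pvCanon estar.2.1) = some ((estar.1 : Int)) := by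
    rw [hof]
    cases hfo : opens.find? (fun e => pvCanon e.2.1 == pvCanon estar.2.1) with
    | none =>
      exact absurd (by simp : (pvCanon estar.2.1 == pvCanon estar.2.1) = true)
        (by simpa using List.find?_eq_none.mp hfo estar hestar)
    | some e0 =>
      have hmem := List.mem_of_find?_eq_some hfo
      have hpred : pvCanon e0.2.1 = pvCanon estar.2.1 := by simpa using List.find?_some hfo
      rw [huniq1 e0 hmem estar hestar hpred]
      rfl
  have hosstar : os.get? (pvCanon estar.2.2) = some ((estar.1 : Int)) := by
    rw [hos]
    cases hfo : opens.find? (fun e => pvCanon e.2.2 == pvCanon estar.2.2) with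
    | none =>
      exact absurd (by simp : (pvCanon estar.2.2 == pvCanon estar.2.2) = true)
        (by simpa using List.find?_eq_none.mp hfo estar hestar)
    | some e0 =>
      have hmem := List.mem_of_find?_eq_some hfo
      have hpred : pvCanon e0.2.2 = pvCanon estar.2.2 := by simpa using List.find?_some hfo
      rw [huniq2 e0 hmem estar hestar hpred]
      rfl
  -- the step computes the in-place merge and erases the slot's keys
  have hstep : pvStepB (res, of, os) p =
      (res.set estar.1 (pvMerge estar.2 p),
       of.erase (pvCanon estar.2.1), os.erase (pvCanon estar.2.2)) := by
    unfold pvStepB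
    rw [show ((res, of, os).2.1.get? (pvCanon p.1)) = of.get? (pvCanon p.1) from rfl]
    rw [show ((res, of, os).2.2.get? (pvCanon p.2)) = os.get? (pvCanon p.2) from rfl]
    rw [hpick]
    simp only [hget, hofstar, hosstar, PySem.List.pySetD_natCast]
    by_cases hsq : pvSetEq estar.2.1 p.1 = true
    · rw [if_pos (hbranch.mpr hsq)]
      unfold pvMerge
      rw [if_pos hsq]
      simp
    · rw [if_neg (fun hc => hsq (hbranch.mp hc))]
      unfold pvMerge
      rw [if_neg hsq]
      simp
  rw [hstep]
  -- split the open slots around the chosen one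
  obtain ⟨as, bs, hsplit⟩ := List.append_of_mem hestar
  have hposs := hsplit ▸ hpos
  have has_lt : ∀ a ∈ as, a.1 < estar.1 := by
    intro a ha
    exact (List.pairwise_append.mp hposs).2.2 a ha estar (by simp)
  have hbs_gt : ∀ b ∈ bs, estar.1 < b.1 := by
    intro b hb
    exact (List.pairwise_cons.mp (List.pairwise_append.mp hposs).2.1).1 b hb
  have hsub : (as ++ bs).Sublist opens := by
    rw [hsplit]
    exact List.Sublist.append_left (List.sublist_cons_self ..) as
  have hmem_sub : ∀ a ∈ as ++ bs, a ∈ opens := fun a ha => hsub.mem ha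
  have hne_star : ∀ a ∈ as ++ bs, a.1 ≠ estar.1 := by
    intro a ha
    rcases List.mem_append.mp ha with h | h
    · exact Nat.ne_of_lt (has_lt a h)
    · exact (Nat.ne_of_lt (hbs_gt a h)).symm
  -- invariants for the recursive call
  have hpos' : List.Pairwise (fun a b => a.1 < b.1) (as ++ bs) := hpos.sublist hsub
  have hnm' : List.Pairwise (fun a b => pvMatch a.2 b.2 = false) (as ++ bs) := hnm.sublist hsub
  have hval' : ∀ e ∈ as ++ bs, e.1 < (res.set estar.1 (pvMerge estar.2 p)).length ∧
      (res.set estar.1 (pvMerge estar.2 p)).getD e.1 ([], []) = e.2 := by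
    intro e he
    constructor
    · rw [List.length_set]
      exact (hval e (hmem_sub e he)).1
    · rw [pvGetD_set_ne _ _ _ _ _ (hne_star e he)]
      exact (hval e (hmem_sub e he)).2
  have hof' : ∀ k, (of.erase (pvCanon estar.2.1)).get? k =
      ((as ++ bs).find? (fun e => pvCanon e.2.1 == k)).map (fun e => (e.1 : Int)) := by
    intro k
    rw [pvDict_get?_erase]
    by_cases hk : k = pvCanon estar.2.1
    · rw [if_pos hk]
      rw [show (as ++ bs).find? (fun e => pvCanon e.2.1 == k) = none from ?_]
      · rfl
      · rw [List.find?_eq_none]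
        intro a ha hc
        have hceq : pvCanon a.2.1 = pvCanon estar.2.1 := by
          rw [← hk]
          simpa using hc
        exact hne_star a ha (congrArg Prod.fst
          (huniq1 a (hmem_sub a ha) estar hestar hceq))
    · rw [if_neg hk, hof k]
      rw [hsplit, pvFind?_append_middle _ _ _ _ (by
        simp only [beq_eq_false_iff_ne, ne_eq]
        exact fun hc => hk hc.symm)]
  have hos' : ∀ k, (os.erase (pvCanon estar.2.2)).get? k =
      ((as ++ bs).find? (fun e => pvCanon e.2.2 == k)).map (fun e => (e.1 : Int)) := by
    intro k
    rw [pvDict_get?_erase]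
    by_cases hk : k = pvCanon estar.2.2
    · rw [if_pos hk]
      rw [show (as ++ bs).find? (fun e => pvCanon e.2.2 == k) = none from ?_]
      · rfl
      · rw [List.find?_eq_none]
        intro a ha hc
        have hceq : pvCanon a.2.2 = pvCanon estar.2.2 := by
          rw [← hk]
          simpa using hc
        exact hne_star a ha (congrArg Prod.fst
          (huniq2 a (hmem_sub a ha) estar hestar hceq))
    · rw [if_neg hk, hos k]
      rw [hsplit, pvFind?_append_middle _ _ _ _ (by
        simp only [beq_eq_false_iff_ne, ne_eq]
        exact fun hc => hk hc.symm)]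
  rw [ihfun _ _ _ _ hpos' hval' hnm' hof' hos']
  -- and the specification absorbs p into the same slot
  have hnmas : ∀ a ∈ as.map (·.2), pvMatch a p = false := by
    intro a ha
    obtain ⟨a0, ha0, rfl⟩ := List.mem_map.mp ha
    cases hb : pvMatch a0.2 p with
    | false => rfl
    | true =>
      have := hmin a0 (hsplit ▸ (by simp [ha0] : a0 ∈ as ++ estar :: bs)) hb
      exact absurd (has_lt a0 ha0) (by omega)
  have hpair_map : List.Pairwise (fun a b => pvMatch a b = false)
      ((as.map (fun e => e.2)) ++ estar.2 :: (bs.map (fun e => e.2))) := by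
    have h1 : (opens.map (fun e => e.2)).Pairwise (fun a b => pvMatch a b = false) :=
      List.Pairwise.map _ (fun a b h => h) hnm
    rw [hsplit] at h1
    simpa using h1
  have hspec := pvSpec_exchange (as.map (fun e => e.2)) estar.2 p (bs.map (fun e => e.2)) l
    hpair_map hmatchstar hnmas
  rw [hsplit]
  simp only [List.map_append, List.map_cons]
  rw [hspec]
  have hout : as.length ≤
      (pvSpec ((as.map (fun e => e.2)) ++ (bs.map (fun e => e.2)) ++ l)).length := by
    have h1 := pvSpec_length_ge (((as ++ bs).map (fun e => e.2)).length + l.length)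
      ((as ++ bs).map (fun e => e.2)) l (le_refl _)
      (List.Pairwise.map _ (fun a b h => h) hnm')
    simp only [List.map_append] at h1
    simp at h1 ⊢
    omega
  rw [List.length_map] at hspec ⊢
  rw [pvPatch_insert as res _ estar.1 estar.2 bs (pvMerge estar.2 p)
    (fun e he => (hval e (hmem_sub e (by simp [he]))).1) hvs.1
    (fun e he => Nat.ne_of_lt (has_lt e he)) hout]

lemma pvFind?_append_none {α : Type} (P : α → Bool) (l₁ l₂ : List α) (h : l₁.find? P = none) :
    (l₁ ++ l₂).find? P = l₂.find? P := by
  induction l₁ with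
  | nil => rfl
  | cons a l ih =>
    by_cases hp : P a
    · rw [List.find?_cons_of_pos hp] at h; cases h
    · rw [List.find?_cons_of_neg (by simp [hp])] at h
      rw [List.cons_append, List.find?_cons_of_neg (by simp [hp])]
      exact ih h

lemma pvFind?_append_some {α : Type} (P : α → Bool) (l₁ l₂ : List α) (e : α)
    (h : l₁.find? P = some e) : (l₁ ++ l₂).find? P = some e := by
  induction l₁ with
  | nil => cases h
  | cons a l ih =>
    by_cases hp : P a
    · rw [List.find?_cons_of_pos hp] at h
      rw [List.cons_append, List.find?_cons_of_pos hp]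
      exact h
    · rw [List.find?_cons_of_neg (by simp [hp])] at h
      rw [List.cons_append, List.find?_cons_of_neg (by simp [hp])]
      exact ih h

lemma pvUniq1 (opens : List (Nat × (List Int × List Int)))
    (hnm : List.Pairwise (fun a b => pvMatch a.2 b.2 = false) opens) :
    ∀ e ∈ opens, ∀ e' ∈ opens, pvCanon e.2.1 = pvCanon e'.2.1 → e = e' := by
  intro e he e' he' hc
  by_contra hne
  have hsym : Symmetric (fun a b : Nat × (List Int × List Int) => pvMatch a.2 b.2 = false) := by
    intro a b h
    rw [pvMatch_symm]
    exact h
  have hm := hnm.forall hsym he he' hne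
  have hmt : pvMatch e.2 e'.2 = true := by
    unfold pvMatch
    rw [(pvSetEq_iff_canon ..).mpr hc]
    simp
  simp [hmt] at hm

lemma pvUniq2 (opens : List (Nat × (List Int × List Int)))
    (hnm : List.Pairwise (fun a b => pvMatch a.2 b.2 = false) opens) :
    ∀ e ∈ opens, ∀ e' ∈ opens, pvCanon e.2.2 = pvCanon e'.2.2 → e = e' := by
  intro e he e' he' hc
  by_contra hne
  have hsym : Symmetric (fun a b : Nat × (List Int × List Int) => pvMatch a.2 b.2 = false) := by
    intro a b h
    rw [pvMatch_symm]
    exact h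
  have hm := hnm.forall hsym he he' hne
  have hmt : pvMatch e.2 e'.2 = true := by
    unfold pvMatch
    rw [(pvSetEq_iff_canon ..).mpr hc]
    simp
  simp [hmt] at hm

lemma pvB_loop :
    ∀ (l res : List (List Int × List Int)) (opens : List (Nat × (List Int × List Int)))
      (of os : PySem.Dict (List Int) Int),
      List.Pairwise (fun a b => a.1 < b.1) opens →
      (∀ e ∈ opens, e.1 < res.length ∧ res.getD e.1 ([], []) = e.2) →
      List.Pairwise (fun a b => pvMatch a.2 b.2 = false) opens →
      (∀ k, of.get? k = (opens.find? (fun e => pvCanon e.2.1 == k)).map (fun e => (e.1 : Int))) →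
      (∀ k, os.get? k = (opens.find? (fun e => pvCanon e.2.2 == k)).map (fun e => (e.1 : Int))) →
      (l.foldl pvStepB (res, of, os)).1 =
        pvPatch res opens (pvSpec (opens.map (fun e => e.2) ++ l)) := by
  intro l
  induction l with
  | nil =>
    intro res opens of os hpos hval hnm hof hos
    rw [List.foldl_nil, List.append_nil,
      pvSpec_pairwise _ (List.Pairwise.map _ (fun a b h => h) hnm)]
    exact (pvPatch_self opens res hval).symm
  | cons p l ih =>
    intro res opens of os hpos hval hnm hof hos
    rw [List.foldl_cons]
    have hofv := hof (pvCanon p.1)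
    have hosv := hos (pvCanon p.2)
    cases hf1 : opens.find? (fun e => pvCanon e.2.1 == pvCanon p.1) with
    | none =>
      cases hf2 : opens.find? (fun e => pvCanon e.2.2 == pvCanon p.2) with
      | none =>
        -- no open slot matches: p opens a fresh slot at the end
        have hnomatch : ∀ e ∈ opens, pvMatch e.2 p = false := by
          intro e he
          have h1 : pvSetEq e.2.1 p.1 = false := by
            cases hb : pvSetEq e.2.1 p.1 with
            | false => rfl
            | true =>
              have hc := (pvSetEq_iff_canon ..).mp hb
              exact absurd (by simp [hc] : (pvCanon e.2.1 == pvCanon p.1) = true)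
                (by simpa using List.find?_eq_none.mp hf1 e he)
          have h2 : pvSetEq e.2.2 p.2 = false := by
            cases hb : pvSetEq e.2.2 p.2 with
            | false => rfl
            | true =>
              have hc := (pvSetEq_iff_canon ..).mp hb
              exact absurd (by simp [hc] : (pvCanon e.2.2 == pvCanon p.2) = true)
                (by simpa using List.find?_eq_none.mp hf2 e he)
          unfold pvMatch
          rw [h1, h2]
          rfl
        have hstep : pvStepB (res, of, os) p =
            (res ++ [p], of.insert (pvCanon p.1) (res.length : Int),
             os.insert (pvCanon p.2) (res.length : Int)) := by
          unfold pvStepB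
          rw [show ((res, of, os).2.1.get? (pvCanon p.1)) = of.get? (pvCanon p.1) from rfl]
          rw [show ((res, of, os).2.2.get? (pvCanon p.2)) = os.get? (pvCanon p.2) from rfl]
          rw [hofv, hosv, hf1, hf2]
          rfl
        rw [hstep]
        have hpos' : List.Pairwise (fun a b => a.1 < b.1) (opens ++ [(res.length, p)]) := by
          rw [List.pairwise_append]
          exact ⟨hpos, by simp, by
            intro a ha b hb
            simp only [List.mem_singleton] at hb
            rw [hb]
            exact (hval a ha).1⟩
        have hval' : ∀ e ∈ opens ++ [(res.length, p)],
            e.1 < (res ++ [p]).length ∧ (res ++ [p]).getD e.1 ([], []) = e.2 := by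
          intro e he
          rcases List.mem_append.mp he with he | he
          · have h1 := (hval e he).1
            constructor
            · simp only [List.length_append, List.length_cons, List.length_nil]
              omega
            · rw [List.getD_eq_getElem?_getD, List.getElem?_append_left h1,
                ← List.getD_eq_getElem?_getD]
              exact (hval e he).2
          · simp only [List.mem_singleton] at he
            rw [he]
            constructor
            · simp
            · rw [List.getD_eq_getElem?_getD, List.getElem?_append_right (le_refl _)]
              simp
        have hnm' : List.Pairwise (fun a b => pvMatch a.2 b.2 = false)
            (opens ++ [(res.length, p)]) := by
          rw [List.pairwise_append]
          exact ⟨hnm, by simp, by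
            intro a ha b hb
            simp only [List.mem_singleton] at hb
            rw [hb]
            exact hnomatch a ha⟩
        have hof' : ∀ k, (of.insert (pvCanon p.1) (res.length : Int)).get? k =
            ((opens ++ [(res.length, p)]).find? (fun e => pvCanon e.2.1 == k)).map
              (fun e => (e.1 : Int)) := by
          intro k
          rw [PySem.Dict.get?_insert]
          by_cases hk : k = pvCanon p.1
          · rw [if_pos hk, pvFind?_append_none _ _ _ (by
              rw [List.find?_eq_none]
              intro a ha hc
              rw [hk] at hc
              have hno := List.find?_eq_none.mp hf1 a ha
              exact absurd hc (by simpa using hno))]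
            rw [List.find?_cons_of_pos (by simp [hk])]
            rfl
          · rw [if_neg hk, hof k]
            cases hfo : opens.find? (fun e => pvCanon e.2.1 == k) with
            | none =>
              rw [pvFind?_append_none _ _ _ hfo,
                List.find?_cons_of_neg (by simp; exact fun hc => hk hc.symm)]
              rfl
            | some e0 => rw [pvFind?_append_some _ _ _ _ hfo]
        have hos' : ∀ k, (os.insert (pvCanon p.2) (res.length : Int)).get? k =
            ((opens ++ [(res.length, p)]).find? (fun e => pvCanon e.2.2 == k)).map
              (fun e => (e.1 : Int)) := by
          intro k
          rw [PySem.Dict.get?_insert]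
          by_cases hk : k = pvCanon p.2
          · rw [if_pos hk, pvFind?_append_none _ _ _ (by
              rw [List.find?_eq_none]
              intro a ha hc
              rw [hk] at hc
              have hno := List.find?_eq_none.mp hf2 a ha
              exact absurd hc (by simpa using hno))]
            rw [List.find?_cons_of_pos (by simp [hk])]
            rfl
          · rw [if_neg hk, hos k]
            cases hfo : opens.find? (fun e => pvCanon e.2.2 == k) with
            | none =>
              rw [pvFind?_append_none _ _ _ hfo,
                List.find?_cons_of_neg (by simp; exact fun hc => hk hc.symm)]
              rfl
            | some e0 => rw [pvFind?_append_some _ _ _ _ hfo]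
        rw [ih _ _ _ _ hpos' hval' hnm' hof' hos']
        have hlen : opens.length + 1 ≤
            (pvSpec (opens.map (fun e => e.2) ++ p :: l)).length := by
          have := pvSpec_length_gt ((opens.map (fun e => e.2)).length + l.length)
            (opens.map (fun e => e.2)) p l (le_refl _)
            (List.Pairwise.map _ (fun a b h => h) hnm)
            (by
              intro a ha
              obtain ⟨a0, ha0, rfl⟩ := List.mem_map.mp ha
              exact hnomatch a0 ha0)
          simpa using this
        have hshape : (opens ++ [(res.length, p)]).map (fun e => e.2) ++ l =
            opens.map (fun e => e.2) ++ p :: l := by simp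
        rw [hshape]
        exact pvPatch_snoc opens res p p _ (fun e he => (hval e he).1) hlen
      | some e2 =>
        -- only a second-component key matches
        have hmem2 := List.mem_of_find?_eq_some hf2
        have hpred2 : pvCanon e2.2.2 = pvCanon p.2 := by simpa using List.find?_some hf2
        have hmatch2 : pvMatch e2.2 p = true := by
          unfold pvMatch
          rw [(pvSetEq_iff_canon ..).mpr hpred2]
          simp
        refine pvB_merge_case p l res opens of os e2 hpos hval hnm hof hos hmem2 hmatch2 ?_ ?_ ?_
          (fun res opens of os h1 h2 h3 h4 h5 => ih res opens of os h1 h2 h3 h4 h5)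
        · rw [hofv, hosv, hf1, hf2]
          rfl
        · rw [hofv, hf1]
          simp only [Option.map_none]
          constructor
          · intro h; cases h
          · intro h
            have hc := (pvSetEq_iff_canon ..).mp h
            exact absurd (by simp [hc] : (pvCanon e2.2.1 == pvCanon p.1) = true)
              (by simpa using List.find?_eq_none.mp hf1 e2 hmem2)
        · intro a ha hm
          rcases Bool.or_eq_true_iff.mp (by simpa [pvMatch] using hm) with h | h
          · have hc := (pvSetEq_iff_canon ..).mp h
            exact absurd (by simp [hc] : (pvCanon a.2.1 == pvCanon p.1) = true)
              (by simpa using List.find?_eq_none.mp hf1 a ha)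
          · have hc := (pvSetEq_iff_canon ..).mp h
            have : a = e2 := pvUniq2 opens hnm a ha e2 hmem2 (hc.trans hpred2.symm)
            rw [this]
    | some e1 =>
      have hmem1 := List.mem_of_find?_eq_some hf1
      have hpred1 : pvCanon e1.2.1 = pvCanon p.1 := by simpa using List.find?_some hf1
      have hmatch1 : pvMatch e1.2 p = true := by
        unfold pvMatch
        rw [(pvSetEq_iff_canon ..).mpr hpred1]
        rfl
      cases hf2 : opens.find? (fun e => pvCanon e.2.2 == pvCanon p.2) with
      | none =>
        refine pvB_merge_case p l res opens of os e1 hpos hval hnm hof hos hmem1 hmatch1 ?_ ?_ ?_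
          (fun res opens of os h1 h2 h3 h4 h5 => ih res opens of os h1 h2 h3 h4 h5)
        · rw [hofv, hosv, hf1, hf2]
          rfl
        · rw [hofv, hf1]
          exact iff_of_true rfl ((pvSetEq_iff_canon ..).mpr hpred1)
        · intro a ha hm
          rcases Bool.or_eq_true_iff.mp (by simpa [pvMatch] using hm) with h | h
          · have hc := (pvSetEq_iff_canon ..).mp h
            have : a = e1 := pvUniq1 opens hnm a ha e1 hmem1 (hc.trans hpred1.symm)
            rw [this]
          · have hc := (pvSetEq_iff_canon ..).mp h
            exact absurd (by simp [hc] : (pvCanon a.2.2 == pvCanon p.2) = true)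
              (by simpa using List.find?_eq_none.mp hf2 a ha)
      | some e2 =>
        have hmem2 := List.mem_of_find?_eq_some hf2
        have hpred2 : pvCanon e2.2.2 = pvCanon p.2 := by simpa using List.find?_some hf2
        have hmatch2 : pvMatch e2.2 p = true := by
          unfold pvMatch
          rw [(pvSetEq_iff_canon ..).mpr hpred2]
          simp
        by_cases hle : e1.1 ≤ e2.1
        · refine pvB_merge_case p l res opens of os e1 hpos hval hnm hof hos hmem1 hmatch1 ?_ ?_ ?_
            (fun res opens of os h1 h2 h3 h4 h5 => ih res opens of os h1 h2 h3 h4 h5)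
          · rw [hofv, hosv, hf1, hf2]
            show (if ((e1.1 : Int) ≤ (e2.1 : Int)) then some ((e1.1 : Int))
              else some ((e2.1 : Int))) = some ((e1.1 : Int))
            rw [if_pos (by exact_mod_cast hle : (e1.1 : Int) ≤ (e2.1 : Int))]
          · rw [hofv, hf1]
            exact iff_of_true rfl ((pvSetEq_iff_canon ..).mpr hpred1)
          · intro a ha hm
            rcases Bool.or_eq_true_iff.mp (by simpa [pvMatch] using hm) with h | h
            · have hc := (pvSetEq_iff_canon ..).mp h
              have : a = e1 := pvUniq1 opens hnm a ha e1 hmem1 (hc.trans hpred1.symm)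
              rw [this]
            · have hc := (pvSetEq_iff_canon ..).mp h
              have : a = e2 := pvUniq2 opens hnm a ha e2 hmem2 (hc.trans hpred2.symm)
              rw [this]
              exact hle
        · refine pvB_merge_case p l res opens of os e2 hpos hval hnm hof hos hmem2 hmatch2 ?_ ?_ ?_
            (fun res opens of os h1 h2 h3 h4 h5 => ih res opens of os h1 h2 h3 h4 h5)
          · rw [hofv, hosv, hf1, hf2]
            show (if ((e1.1 : Int) ≤ (e2.1 : Int)) then some ((e1.1 : Int))
              else some ((e2.1 : Int))) = some ((e2.1 : Int))
            rw [if_neg (fun hc => hle (by exact_mod_cast hc))]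
          · rw [hofv, hf1]
            constructor
            · intro h
              have h2 := Option.some.inj h
              simp only at h2
              have h3 : e2.1 = e1.1 := by exact_mod_cast h2
              omega
            · intro h
              have hc := (pvSetEq_iff_canon ..).mp h
              have : e2 = e1 := pvUniq1 opens hnm e2 hmem2 e1 hmem1 (hc.trans hpred1.symm)
              rw [this]
              rfl
          · intro a ha hm
            rcases Bool.or_eq_true_iff.mp (by simpa [pvMatch] using hm) with h | h
            · have hc := (pvSetEq_iff_canon ..).mp h
              have : a = e1 := pvUniq1 opens hnm a ha e1 hmem1 (hc.trans hpred1.symm)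
              rw [this]
              omega
            · have hc := (pvSetEq_iff_canon ..).mp h
              have : a = e2 := pvUniq2 opens hnm a ha e2 hmem2 (hc.trans hpred2.symm)
              rw [this]

theorem condense_list_B_eq_spec (l : List (List Int × List Int)) : condense_list_alt l = pvSpec l := by
  unfold condense_list_alt
  rw [pvB_loop l [] [] PySem.Dict.empty PySem.Dict.empty (by simp) (by simp) (by simp)
    (by intro k; simp [PySem.Dict.get?_empty]) (by intro k; simp [PySem.Dict.get?_empty])]
  simp [pvPatch]

-- ===== VERDICT (by name: the statement is the Claim_ definition above) =====
theorem condense_list_spec : Claim_equal_condense_list := by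
  intro l _
  unfold Spec_condense_list
  rw [condense_list_A_eq_spec, condense_list_B_eq_spec]
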